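-- pv_equiv track=rewrite | github.com/Ozairfzn/Okayy | OC Informatique/L-système/arbre.py | iterer_lsysteme
-- ===== SOURCE A (Python) =====
-- def iterer_lsysteme(depart, regle, k):
--     res = ""
--     ini = depart
--     for i in range(k):
--         for j in ini:
--             if j == regle[0]:
--                 res += regle[1]
--             else:
--                 res += j
--         ini, res = res, ""
--     return ini
-- ===== SOURCE B (Python) =====
-- def iterer_lsysteme(depart, regle, k):
--     s, r = regle[0], regle[1]
--     # level = what a single s-symbol becomes after n generations (bottom-up table)
--     level = s
--     for _ in range(k):
--         level = "".join(level if ch == s else ch for ch in r)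
--     return "".join(level if c == s else c for c in depart)
-- ===== Notes on version B (the rewrite author's own statement) =====
-- stated objective: alternative
-- what changed: Instead of rewriting the whole (growing) string k times, B iterates the rule k times on the single rule symbol alone and then substitutes that expansion once into depart, exploiting that the rewrite is a homomorphism per character.
import Mathlib
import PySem

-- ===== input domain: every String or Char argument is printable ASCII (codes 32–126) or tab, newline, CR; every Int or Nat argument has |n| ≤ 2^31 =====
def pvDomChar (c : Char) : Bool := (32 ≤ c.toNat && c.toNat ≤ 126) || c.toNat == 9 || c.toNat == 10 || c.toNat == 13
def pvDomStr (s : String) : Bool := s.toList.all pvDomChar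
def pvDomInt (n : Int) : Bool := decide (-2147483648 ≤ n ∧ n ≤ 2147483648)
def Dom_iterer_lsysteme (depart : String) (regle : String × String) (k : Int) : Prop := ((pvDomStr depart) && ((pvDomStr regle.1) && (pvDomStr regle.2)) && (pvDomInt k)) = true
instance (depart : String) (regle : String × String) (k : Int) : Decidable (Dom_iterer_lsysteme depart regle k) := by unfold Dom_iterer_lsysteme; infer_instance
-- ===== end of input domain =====

-- B replaces A's k whole-string rewriting passes by iterating the rule k times on the single
-- rule symbol and substituting that expansion once into depart (objective: alternative algorithm).

-- ===== PORT A =====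
-- one pass of A's inner loop: res starts "", each char j appends regle[1] if j == regle[0] else j
def pvStepA (regle : String × String) (ini : String) : String :=
  String.ofList (ini.toList.foldl
    (fun res j => res ++ (if String.ofList [j] = regle.1 then regle.2.toList else [j])) [])

-- A's outer 'for i in range(k)' loop: ini, res = res, ""
def pvLoopA (regle : String × String) : Nat → String → String
  | 0, ini => ini
  | n+1, ini => pvLoopA regle n (pvStepA regle ini)

def iterer_lsysteme (depart : String) (regle : String × String) (k : Int) : String :=
  pvLoopA regle k.toNat depart

-- ===== PORT B =====
-- "".join(t-as-expansion if c == s else c for c in x)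
def pvSubst (regle : String × String) (t : List Char) (x : List Char) : List Char :=
  (x.map (fun c => if String.ofList [c] = regle.1 then t else [c])).flatten

-- B's bottom-up table loop 'for _ in range(k)': level after n iterations of the rule on the single symbol
def pvLevels (regle : String × String) (n : Nat) : List Char :=
  (List.range n).foldl (fun level _ => pvSubst regle level regle.2.toList) regle.1.toList

def iterer_lsysteme_alt (depart : String) (regle : String × String) (k : Int) : String :=
  String.ofList (pvSubst regle (pvLevels regle k.toNat) depart.toList)

-- ===== PRECONDITION & SPEC =====
def Spec_iterer_lsysteme (depart : String) (regle : String × String) (k : Int) (out : String) : Prop := out = iterer_lsysteme_alt depart regle k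
instance (depart : String) (regle : String × String) (k : Int) (out : String) : Decidable (Spec_iterer_lsysteme depart regle k out) := by unfold Spec_iterer_lsysteme; infer_instance

-- ===== CLAIM (what is proved, stated in full; the proofs are below) =====
def Claim_equal_iterer_lsysteme : Prop := ∀ (depart : String) (regle : String × String) (k : Int), Dom_iterer_lsysteme depart regle k → Spec_iterer_lsysteme depart regle k (iterer_lsysteme depart regle k)

-- ===== LEMMAS AND PROOFS =====

theorem pvLevels_zero (regle : String × String) : pvLevels regle 0 = regle.1.toList := rfl

theorem pvLevels_succ (regle : String × String) (n : Nat) :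
    pvLevels regle (n+1) = pvSubst regle (pvLevels regle n) regle.2.toList := by
  simp [pvLevels, List.range_succ]

theorem pvSubst_nil (regle : String × String) (t : List Char) : pvSubst regle t [] = [] := rfl

theorem pvSubst_cons (regle : String × String) (t : List Char) (c : Char) (x : List Char) :
    pvSubst regle t (c :: x) =
      (if String.ofList [c] = regle.1 then t else [c]) ++ pvSubst regle t x := by
  simp [pvSubst]

theorem pvSubst_append (regle : String × String) (t x y : List Char) :
    pvSubst regle t (x ++ y) = pvSubst regle t x ++ pvSubst regle t y := by
  simp [pvSubst]

-- substituting the symbol for itself is the identity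
theorem pvSubst_self (regle : String × String) (x : List Char) :
    pvSubst regle regle.1.toList x = x := by
  induction x with
  | nil => rfl
  | cons c x ih =>
    rw [pvSubst_cons, ih]
    split_ifs with h
    · rw [← h, String.toList_ofList]; rfl
    · rfl

-- substitution composes: subst t ∘ subst r = subst (subst t r)
theorem pvSubst_subst (regle : String × String) (t x : List Char) :
    pvSubst regle t (pvSubst regle regle.2.toList x) =
      pvSubst regle (pvSubst regle t regle.2.toList) x := by
  induction x with
  | nil => rfl
  | cons c x ih =>
    rw [pvSubst_cons, pvSubst_append, ih, pvSubst_cons]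
    split_ifs with h
    · rfl
    · rw [pvSubst_cons, pvSubst_nil]
      simp [h]

-- A's accumulator loop is one substitution pass
theorem foldl_step (regle : String × String) :
    ∀ (x acc : List Char),
      x.foldl (fun res j => res ++ (if String.ofList [j] = regle.1 then regle.2.toList else [j])) acc
        = acc ++ pvSubst regle regle.2.toList x := by
  intro x
  induction x with
  | nil => intro acc; simp [pvSubst_nil]
  | cons c x ih =>
    intro acc
    rw [List.foldl_cons, ih, pvSubst_cons, List.append_assoc]

theorem pvStepA_eq (regle : String × String) (st : String) :
    pvStepA regle st = String.ofList (pvSubst regle regle.2.toList st.toList) := by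
  unfold pvStepA
  rw [foldl_step, List.nil_append]

-- A's k passes equal one substitution by B's k-th level
theorem pvLoopA_eq (regle : String × String) :
    ∀ (n : Nat) (st : String),
      pvLoopA regle n st = String.ofList (pvSubst regle (pvLevels regle n) st.toList) := by
  intro n
  induction n with
  | zero => intro st; simp [pvLoopA, pvLevels_zero, pvSubst_self, String.ofList_toList]
  | succ n ih =>
    intro st
    rw [pvLoopA, pvStepA_eq, ih]
    rw [String.toList_ofList, pvSubst_subst, ← pvLevels_succ]

-- ===== VERDICT (by name: the statement is the Claim_ definition above) =====
theorem iterer_lsysteme_spec : Claim_equal_iterer_lsysteme := by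
  intro depart regle k _
  unfold Spec_iterer_lsysteme iterer_lsysteme iterer_lsysteme_alt
  exact pvLoopA_eq regle k.toNat depart
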